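-- pv_equiv track=rewrite | github.com/AliceInWonderland61/spring2025-python | Week2/week-2-S1-P2.py | find_final_hub
-- ===== SOURCE A (Python) =====
-- def find_final_hub(paths):
--     #so we need to compare the second element of the first [] to the first element of the second[] and so forth
--
--     final_comm_hub=paths[0][0]
--
--     if len(paths)==1:
--         return paths[0][1]
--
--     for i in range(len(paths)):
--         for j in range(i+1, len(paths)):
--
--             if paths[i][1]==paths[j][0]:
--                 final_comm_hub=paths[j][1]
--     return final_comm_hub
-- ===== SOURCE B (Python) =====
-- def find_final_hub(paths):
--     if len(paths) == 1:
--         return paths[0][1]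
--     # last index at which each start value occurs
--     last = {}
--     for j, p in enumerate(paths):
--         last[p[0]] = j
--     # scan i descending: the last (i, j) pair A's nested loops would match
--     for i in range(len(paths) - 2, -1, -1):
--         j = last.get(paths[i][1], -1)
--         if j > i:
--             return paths[j][1]
--     return paths[0][0]
-- ===== Notes on version B (the rewrite author's own statement) =====
-- stated objective: faster
-- what changed: B replaces A's nested i<j scan with a single dict pass recording the last index of each start value, then one descending scan over i that returns at the first (= A's last-updated) matching pair.
import Mathlib
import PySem

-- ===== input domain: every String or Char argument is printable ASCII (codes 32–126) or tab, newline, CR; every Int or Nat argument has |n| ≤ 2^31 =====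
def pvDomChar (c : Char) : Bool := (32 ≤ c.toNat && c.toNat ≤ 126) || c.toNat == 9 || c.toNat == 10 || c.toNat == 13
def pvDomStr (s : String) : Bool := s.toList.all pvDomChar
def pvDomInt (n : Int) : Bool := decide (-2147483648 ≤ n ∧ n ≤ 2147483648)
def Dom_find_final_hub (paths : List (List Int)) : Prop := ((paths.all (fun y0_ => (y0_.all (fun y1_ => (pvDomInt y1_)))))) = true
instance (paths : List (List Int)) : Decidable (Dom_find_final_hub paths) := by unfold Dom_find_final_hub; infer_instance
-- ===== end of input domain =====

-- B replaces A's quadratic nested scan by a dict of last start-indices plus one descending scan (asymptotically faster).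

-- ===== PORT A =====
def find_final_hub (paths : List (List Int)) : Int :=
  let final0 := PySem.List.pyGetD (PySem.List.pyGetD paths 0 []) 0 0
  if paths.length = 1 then
    PySem.List.pyGetD (PySem.List.pyGetD paths 0 []) 1 0
  else
    (PySem.List.pyRange 0 (paths.length : Int) 1).foldl (fun acc i =>
      (PySem.List.pyRange (i + 1) (paths.length : Int) 1).foldl (fun acc2 j =>
        if PySem.List.pyGetD (PySem.List.pyGetD paths i []) 1 0
             == PySem.List.pyGetD (PySem.List.pyGetD paths j []) 0 0 then
          PySem.List.pyGetD (PySem.List.pyGetD paths j []) 1 0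
        else acc2) acc) final0

-- ===== PORT B =====
def find_final_hub_alt (paths : List (List Int)) : Int :=
  if paths.length = 1 then
    PySem.List.pyGetD (PySem.List.pyGetD paths 0 []) 1 0
  else
    let last : PySem.Dict Int Int :=
      (PySem.List.enumerate paths 0).foldl
        (fun d jp => d.insert (PySem.List.pyGetD jp.2 0 0) jp.1) PySem.Dict.empty
    let res : Option Int :=
      (PySem.List.pyRange ((paths.length : Int) - 2) (-1) (-1)).findSome? (fun i =>
        let j := last.getD (PySem.List.pyGetD (PySem.List.pyGetD paths i []) 1 0) (-1)
        if j > i then some (PySem.List.pyGetD (PySem.List.pyGetD paths j []) 1 0) else none)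
    res.getD (PySem.List.pyGetD (PySem.List.pyGetD paths 0 []) 0 0)

-- ===== PRECONDITION & SPEC =====
-- Pre_ excludes exactly the inputs on which Python A raises IndexError: the empty list; a single
-- path shorter than 2; with several paths, an empty path, a non-last path shorter than 2, or a
-- matched pair whose second path is shorter than 2.
def Pre_find_final_hub (paths : List (List Int)) : Prop :=
  paths ≠ [] ∧
  (paths.length = 1 → 2 ≤ (paths.getD 0 []).length) ∧
  (paths.length ≠ 1 →
     (∀ k, k < paths.length → 1 ≤ (paths.getD k []).length) ∧
     (∀ k, k < paths.length - 1 → 2 ≤ (paths.getD k []).length) ∧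
     (∀ l, l < paths.length → ∀ k, k < l →
        (paths.getD k []).getD 1 0 = (paths.getD l []).getD 0 0 →
        2 ≤ (paths.getD l []).length))
instance (paths : List (List Int)) : Decidable (Pre_find_final_hub paths) := by
  unfold Pre_find_final_hub; infer_instance

def pvWitness_find_final_hub : List (List Int) := [[1, 2], [2, 3]]

def Spec_find_final_hub (paths : List (List Int)) (out : Int) : Prop := out = find_final_hub_alt paths
instance (paths : List (List Int)) (out : Int) : Decidable (Spec_find_final_hub paths out) := by unfold Spec_find_final_hub; infer_instance

-- ===== CLAIM (what is proved, stated in full; the proofs are below) =====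
def Claim_equal_find_final_hub : Prop := ∀ (paths : List (List Int)), Dom_find_final_hub paths → Pre_find_final_hub paths → Spec_find_final_hub paths (find_final_hub paths)

-- ===== LEMMAS AND PROOFS =====

-- a fold that conditionally overwrites its accumulator keeps the value of the LAST hit
theorem pv_foldl_optD {α β : Type} (l : List α) (g : α → Option β) (a : β) :
    l.foldl (fun acc k => (g k).getD acc) a = (l.reverse.findSome? g).getD a := by
  induction l generalizing a with
  | nil => simp
  | cons x xs ih =>
    simp only [List.foldl_cons, List.reverse_cons, List.findSome?_append]
    rw [ih]
    cases h : xs.reverse.findSome? g with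
    | some m => simp
    | none => cases hx : g x <;> simp [List.findSome?, hx]

-- findSome? of a guarded some is find? then map
theorem pv_findSome?_guard {α β : Type} (l : List α) (p : α → Bool) (f : α → β) :
    l.findSome? (fun x => if p x then some (f x) else none) = (l.find? p).map f := by
  induction l with
  | nil => rfl
  | cons x xs ih =>
    simp only [List.findSome?, List.find?]
    cases h : p x <;> simp [ih]

-- a dict built by an insert loop looks the key up to the LAST inserted occurrence's value
theorem pv_getD_foldl_insert {α : Type} (l : List α) (k : α → Int) (v : α → Int)
    (d : PySem.Dict Int Int) (x : Int) (d0 : Int) :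
    (l.foldl (fun d a => d.insert (k a) (v a)) d).getD x d0
      = match l.reverse.find? (fun a => k a == x) with
        | some a => v a
        | none => d.getD x d0 := by
  induction l generalizing d with
  | nil => simp
  | cons y ys ih =>
    simp only [List.foldl_cons, List.reverse_cons, List.find?_append]
    rw [ih]
    cases h : ys.reverse.find? (fun a => k a == x) with
    | some m => simp
    | none =>
      by_cases hx : k y = x
      · simp [List.find?, hx]
      · have hb : (k y == x) = false := by simp [hx]
        simp [List.find?, hb, PySem.Dict.getD_insert, Ne.symm hx]

theorem pv_findSome?_congr {α β : Type} (l : List α) (f g : α → Option β)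
    (h : ∀ x ∈ l, f x = g x) : l.findSome? f = l.findSome? g := by
  induction l with
  | nil => rfl
  | cons x xs ih =>
    simp only [List.findSome?]
    rw [h x (by simp)]
    cases g x with
    | some v => rfl
    | none => exact ih (fun y hy => h y (by simp [hy]))

theorem find_final_hub_spec : Claim_equal_find_final_hub := by
  intro paths _ hpre
  unfold Spec_find_final_hub find_final_hub find_final_hub_alt
  by_cases h1 : paths.length = 1
  · simp [h1]
  · simp only [h1, if_false]
    obtain ⟨hne, -⟩ := hpre
    have hlen1 : 1 ≤ paths.length := List.length_pos_of_ne_nil hne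
    have hn2 : (2 : Int) ≤ (paths.length : Int) := by
      have : 2 ≤ paths.length := by omega
      exact_mod_cast this
    set n : Int := (paths.length : Int) with hn
    set s : Int → Int := fun j => PySem.List.pyGetD (PySem.List.pyGetD paths j []) 0 0 with hs
    set t : Int → Int := fun i => PySem.List.pyGetD (PySem.List.pyGetD paths i []) 1 0 with ht
    set G : Int → Option Int :=
      fun i => ((PySem.List.pyRange (i + 1) n 1).reverse.find? (fun j => t i == s j)).map t with hG
    -- A's value
    have hA : (PySem.List.pyRange 0 n 1).foldl (fun acc i =>
        (PySem.List.pyRange (i + 1) n 1).foldl (fun acc2 j =>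
          if t i == s j then t j else acc2) acc) (s 0)
        = ((PySem.List.pyRange 0 n 1).reverse.findSome? G).getD (s 0) := by
      have hinner : (fun (acc : Int) (i : Int) =>
          (PySem.List.pyRange (i + 1) n 1).foldl (fun acc2 j =>
            if t i == s j then t j else acc2) acc)
          = fun acc i => (G i).getD acc := by
        funext acc i
        have hbody : (fun (acc2 : Int) (j : Int) => if t i == s j then t j else acc2)
            = fun acc2 j => (((fun j => if (t i == s j : Bool) then some (t j) else none) : Int → Option Int) j).getD acc2 := by
          funext acc2 j
          by_cases h : (t i == s j : Bool) <;> simp [h]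
        rw [hbody, pv_foldl_optD, pv_findSome?_guard]
      rw [hinner, pv_foldl_optD]
    rw [hA]
    -- B's dict
    have hdict : ((PySem.List.enumerate paths 0).foldl
          (fun d jp => d.insert (PySem.List.pyGetD jp.2 0 0) jp.1) PySem.Dict.empty)
        = (PySem.List.pyRange 0 n 1).foldl (fun d j => d.insert (s j) j) PySem.Dict.empty := by
      rw [PySem.List.enumerate_eq_map_pyRange paths ([] : List Int), List.foldl_map]
      simp only [PySem.List.len_eq, hs, hn]
    have hget : ∀ x : Int, (((PySem.List.pyRange 0 n 1).foldl
          (fun d j => d.insert (s j) j) PySem.Dict.empty).getD x (-1))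
        = match (PySem.List.pyRange 0 n 1).reverse.find? (fun j => s j == x) with
          | some j => j
          | none => -1 := by
      intro x
      rw [pv_getD_foldl_insert (PySem.List.pyRange 0 n 1) s (fun j => j) PySem.Dict.empty x (-1)]
      cases hf : (PySem.List.pyRange 0 n 1).reverse.find? (fun j => s j == x) <;> simp
    -- strip the leading index n-1 from A's reversed outer range (its inner range is empty)
    have hsplit : PySem.List.pyRange 0 n 1 = PySem.List.pyRange 0 (n - 1) 1 ++ [n - 1] := by
      have := PySem.List.pyRange_one_succ_right (a := 0) (b := n - 1) (by omega)
      simpa [show n - 1 + 1 = n by ring] using this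
    have hGtop : G (n - 1) = none := by
      simp [hG, PySem.List.pyRange_one_eq_nil (a := n) (b := n) le_rfl, show n - 1 + 1 = n by ring]
    -- B's scan range is A's outer range (minus its last index), reversed
    have hrev : PySem.List.pyRange (n - 2) (-1) (-1) = (PySem.List.pyRange 0 (n - 1) 1).reverse := by
      rw [PySem.List.pyRange_neg_one_eq_reverse, show (-1 : Int) + 1 = 0 by ring,
        show n - 2 + 1 = n - 1 by ring]
    -- pointwise agreement of the two searches on 0 <= i < n-1
    have hpoint : ∀ i ∈ (PySem.List.pyRange 0 (n - 1) 1).reverse,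
        G i = (if (((PySem.List.pyRange 0 n 1).foldl (fun d j => d.insert (s j) j)
                  PySem.Dict.empty).getD (t i) (-1)) > i then
            some (t (((PySem.List.pyRange 0 n 1).foldl (fun d j => d.insert (s j) j)
                  PySem.Dict.empty).getD (t i) (-1)))
          else none) := by
      intro i hi
      rw [List.mem_reverse, PySem.List.mem_pyRange_one] at hi
      obtain ⟨hi0, hi1⟩ := hi
      rw [hget (t i)]
      have hpp : (fun j => (s j == t i : Bool)) = (fun j => (t i == s j : Bool)) := by
        funext j
        by_cases h : s j = t i
        · simp [h]
        · simp [h, Ne.symm h]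
      rw [hpp]
      have hsplit2 : PySem.List.pyRange 0 n 1
          = PySem.List.pyRange 0 (i + 1) 1 ++ PySem.List.pyRange (i + 1) n 1 :=
        PySem.List.pyRange_one_append 0 (i + 1) n (by omega) (by omega)
      rw [hsplit2, List.reverse_append, List.find?_append]
      cases hF2 : (PySem.List.pyRange (i + 1) n 1).reverse.find? (fun j => (t i == s j : Bool)) with
      | some j0 =>
        have hmem : j0 ∈ PySem.List.pyRange (i + 1) n 1 := by
          have := List.mem_of_find?_eq_some hF2
          rwa [List.mem_reverse] at this
        rw [PySem.List.mem_pyRange_one] at hmem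
        simp only [hG, hF2, Option.map_some, Option.some_or]
        rw [if_pos (by omega : j0 > i)]
      | none =>
        simp only [hG, hF2, Option.map_none, Option.none_or]
        cases hF1 : (PySem.List.pyRange 0 (i + 1) 1).reverse.find? (fun j => (t i == s j : Bool)) with
        | some j0 =>
          have hmem : j0 ∈ PySem.List.pyRange 0 (i + 1) 1 := by
            have := List.mem_of_find?_eq_some hF1
            rwa [List.mem_reverse] at this
          rw [PySem.List.mem_pyRange_one] at hmem
          rw [if_neg (by omega : ¬ j0 > i)]
        | none =>
          rw [if_neg (by omega : ¬ (-1 : Int) > i)]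
    -- assemble
    rw [hdict, hrev]
    conv_lhs => rw [hsplit, List.reverse_append,
      show ([n - 1] : List Int).reverse = [n - 1] from rfl, List.singleton_append]
    simp only [List.findSome?_cons, hGtop]
    exact congrArg (fun o => Option.getD o (s 0))
      (pv_findSome?_congr _ _ _ (fun i hi => hpoint i hi))
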